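-- pv_equiv track=rewrite | github.com/JBRS307/WDI | kolosy/2021-22/zad2.1.py | gen_nums
-- ===== SOURCE A (Python) =====
-- def is_prime(n):
--     if n == 2 or n == 3:
--         return True
--     if n%2 == 0 or n%3 == 0 or n <= 1:
--         return False
--
--     i = 5
--     while i*i <= n:
--         if n%i == 0:
--             return False
--         i += 2
--
--         if n%i == 0:
--             return False
--         i += 4
--
--     return True
--
-- def gen_primes(arr, leng):
--     primes = []
--
--     for i in range(leng):
--         if is_prime(arr[i]):
--             primes.append((i, arr[i]))
--
--     return primes
--
-- def gen_nums(arr, leng):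
--     primes = gen_primes(arr, leng)
--     nums = []
--
--     prod = 1
--     for i in range(len(primes)):
--         prod *= primes[i][1]
--         nums.append((primes[i][0], prod))
--
--     return nums
-- ===== SOURCE B (Python) =====
-- def is_prime(n):
--     if n == 2 or n == 3:
--         return True
--     if n%2 == 0 or n%3 == 0 or n <= 1:
--         return False
--
--     i = 5
--     while i*i <= n:
--         if n%i == 0:
--             return False
--         i += 2
--
--         if n%i == 0:
--             return False
--         i += 4
--
--     return True
--
-- def gen_nums(arr, leng):
--     nums = []
--     prod = 1
--     for i in range(leng):
--         if is_prime(arr[i]):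
--             prod *= arr[i]
--             nums.append((i, prod))
--     return nums
-- ===== Notes on version B (the rewrite author's own statement) =====
-- stated objective: simpler
-- what changed: Replaced the two sequential passes (gen_primes builds an intermediate (index, prime) list, then a second indexed loop computes cumulative products) by one fused pass that keeps a running product and appends (i, prod) directly, with no intermediate list and no gen_primes helper.
import Mathlib
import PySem

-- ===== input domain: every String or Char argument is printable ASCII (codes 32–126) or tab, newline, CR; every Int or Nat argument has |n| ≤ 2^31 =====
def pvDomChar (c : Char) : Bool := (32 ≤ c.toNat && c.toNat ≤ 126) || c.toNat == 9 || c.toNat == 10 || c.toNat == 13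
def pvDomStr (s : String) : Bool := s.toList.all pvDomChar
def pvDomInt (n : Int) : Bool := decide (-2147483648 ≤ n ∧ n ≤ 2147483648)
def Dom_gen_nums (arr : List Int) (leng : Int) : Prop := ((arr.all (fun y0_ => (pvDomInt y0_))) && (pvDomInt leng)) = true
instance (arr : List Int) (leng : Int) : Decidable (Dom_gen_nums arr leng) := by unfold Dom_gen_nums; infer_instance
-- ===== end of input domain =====

-- B fuses A's two passes (filter primes, then cumulative product) into one pass with no
-- intermediate primes list; objective: simpler (same asymptotic cost).

-- ===== PORT A =====
-- the 6k±1 trial-division loop of is_prime, structural on a fuel counter; n.toNat fuel is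
-- exact: i starts at 5 and grows by 6 each step, so after n.toNat steps i*i > n and the
-- Python while-loop would exit with True just the same
def isPrimeLoop (n : Int) : Nat → Int → Bool
  | 0, _ => true
  | fuel + 1, i =>
    if i * i ≤ n then
      if PySem.Int.mod n i = 0 then false
      else if PySem.Int.mod n (i + 2) = 0 then false
      else isPrimeLoop n fuel (i + 2 + 4)
    else true

def is_prime (n : Int) : Bool :=
  if n = 2 || n = 3 then true
  else if PySem.Int.mod n 2 = 0 || PySem.Int.mod n 3 = 0 || n ≤ 1 then false
  else isPrimeLoop n n.toNat 5

-- arr[i] is in range for every i in range(leng) under Pre_; pyGetD's default is never used there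
def gen_primes (arr : List Int) (leng : Int) : List (Int × Int) :=
  (PySem.List.pyRange 0 leng 1).foldl
    (fun primes i =>
      if is_prime (PySem.List.pyGetD arr i 0) then primes ++ [(i, PySem.List.pyGetD arr i 0)]
      else primes) []

def gen_nums (arr : List Int) (leng : Int) : List (Int × Int) :=
  let primes := gen_primes arr leng
  ((PySem.List.pyRange 0 (primes.length : Int) 1).foldl
    (fun (st : Int × List (Int × Int)) i =>
      let p := PySem.List.pyGetD primes i (0, 0)
      let prod := st.1 * p.2
      (prod, st.2 ++ [(p.1, prod)])) (1, [])).2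

-- ===== PORT B =====
def gen_nums_alt (arr : List Int) (leng : Int) : List (Int × Int) :=
  ((PySem.List.pyRange 0 leng 1).foldl
    (fun (st : Int × List (Int × Int)) i =>
      let x := PySem.List.pyGetD arr i 0
      if is_prime x then (st.1 * x, st.2 ++ [(i, st.1 * x)]) else st) (1, [])).2

-- ===== PRECONDITION & SPEC =====
-- Pre_ excludes exactly leng > len(arr), where Python A (and B) raise IndexError at arr[i]
def Pre_gen_nums (arr : List Int) (leng : Int) : Prop := leng ≤ (arr.length : Int)
instance (arr : List Int) (leng : Int) : Decidable (Pre_gen_nums arr leng) := by unfold Pre_gen_nums; infer_instance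
def pvWitness_gen_nums : List Int × Int := ([4, 2, 3, 9, 5], 4)

def Spec_gen_nums (arr : List Int) (leng : Int) (out : List (Int × Int)) : Prop := out = gen_nums_alt arr leng
instance (arr : List Int) (leng : Int) (out : List (Int × Int)) : Decidable (Spec_gen_nums arr leng out) := by unfold Spec_gen_nums; infer_instance

-- ===== CLAIM (what is proved, stated in full; the proofs are below) =====
def Claim_equal_gen_nums : Prop := ∀ (arr : List Int) (leng : Int), Dom_gen_nums arr leng → Pre_gen_nums arr leng → Spec_gen_nums arr leng (gen_nums arr leng)

-- ===== LEMMAS AND PROOFS =====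

-- A's second pass: step on one (index, prime) pair
def step2 (st : Int × List (Int × Int)) (p : Int × Int) : Int × List (Int × Int) :=
  (st.1 * p.2, st.2 ++ [(p.1, st.1 * p.2)])

-- A's first pass accumulates by appending: pull the accumulator out front
theorem gen_primes_acc (pr : Int → Bool) (x : Int → Int) (l : List Int)
    (acc : List (Int × Int)) :
    l.foldl (fun primes i => if pr i then primes ++ [(i, x i)] else primes) acc
      = acc ++ l.foldl (fun primes i => if pr i then primes ++ [(i, x i)] else primes) [] := by
  induction l generalizing acc with
  | nil => simp
  | cons a l ih =>
    simp only [List.foldl_cons]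
    rw [ih, ih (if pr a then [] ++ [(a, x a)] else [])]
    by_cases h : pr a = true <;> simp [h]

-- fusion: B's single pass over the index list equals A's second pass over A's filtered list
theorem fuse (pr : Int → Bool) (x : Int → Int) (l : List Int) (st : Int × List (Int × Int)) :
    l.foldl (fun st i => if pr i then (st.1 * x i, st.2 ++ [(i, st.1 * x i)]) else st) st
      = (l.foldl (fun primes i => if pr i then primes ++ [(i, x i)] else primes) []).foldl step2 st := by
  induction l generalizing st with
  | nil => simp
  | cons a l ih =>
    simp only [List.foldl_cons]
    by_cases h : pr a = true
    · simp only [h, if_true, List.nil_append]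
      rw [ih, gen_primes_acc pr x l [(a, x a)], List.foldl_append]
      simp [step2]
    · simp only [h]
      exact ih st

-- ===== VERDICT (by name: the statement is the Claim_ definition above) =====
theorem gen_nums_spec : Claim_equal_gen_nums := by
  intro arr leng _ _
  show gen_nums arr leng = gen_nums_alt arr leng
  exact congrArg Prod.snd
    ((PySem.List.foldl_pyRange_zero_pyGetD' (gen_primes arr leng) ((0 : Int), (0 : Int))
        step2 ((1 : Int), ([] : List (Int × Int)))).trans
      (fuse (fun i => is_prime (PySem.List.pyGetD arr i 0))
        (fun i => PySem.List.pyGetD arr i 0) (PySem.List.pyRange 0 leng 1)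
        ((1 : Int), [])).symm)
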